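-- pv_equiv track=rewrite | github.com/i11box/f5_tts-fasterDiT | scripts/window_ratio_try.py | count_methods
-- ===== SOURCE A (Python) =====
-- def count_methods(methods_list):
--     # 将二维列表展平并统计每种方法的出现次数
--     flat_list = [item for sublist in methods_list for item in sublist]
--     counts = {
--         'full_attention': flat_list.count('full_attention'),
--         'wars': flat_list.count('wars'),
--         'AST': flat_list.count('AST'),
--         'ASC': flat_list.count('ASC'),
--         'wars+ASC': flat_list.count('wars+ASC')
--     }
--     return counts
-- ===== SOURCE B (Python) =====
-- def _bisect_left(a, x):
--     lo, hi = 0, len(a)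
--     while lo < hi:
--         mid = (lo + hi) // 2
--         if a[mid] < x:
--             lo = mid + 1
--         else:
--             hi = mid
--     return lo
--
--
-- def _bisect_right(a, x):
--     lo, hi = 0, len(a)
--     while lo < hi:
--         mid = (lo + hi) // 2
--         if x < a[mid]:
--             hi = mid
--         else:
--             lo = mid + 1
--     return lo
--
--
-- def count_methods(methods_list):
--     # sort the flattened data once; each method's count is the width of its
--     # contiguous block in the sorted list, found by two binary searches
--     flat = sorted(item for sublist in methods_list for item in sublist)
--     return {k: _bisect_right(flat, k) - _bisect_left(flat, k)
--             for k in ('full_attention', 'wars', 'AST', 'ASC', 'wars+ASC')}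
-- ===== Notes on version B (the rewrite author's own statement) =====
-- stated objective: alternative
-- what changed: Instead of flattening and linearly scanning the flat list five times with .count, B sorts the flattened data once and obtains each method's count as the width of its contiguous block in the sorted list via two hand-written binary searches (bisect_left/bisect_right).
import Mathlib
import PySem

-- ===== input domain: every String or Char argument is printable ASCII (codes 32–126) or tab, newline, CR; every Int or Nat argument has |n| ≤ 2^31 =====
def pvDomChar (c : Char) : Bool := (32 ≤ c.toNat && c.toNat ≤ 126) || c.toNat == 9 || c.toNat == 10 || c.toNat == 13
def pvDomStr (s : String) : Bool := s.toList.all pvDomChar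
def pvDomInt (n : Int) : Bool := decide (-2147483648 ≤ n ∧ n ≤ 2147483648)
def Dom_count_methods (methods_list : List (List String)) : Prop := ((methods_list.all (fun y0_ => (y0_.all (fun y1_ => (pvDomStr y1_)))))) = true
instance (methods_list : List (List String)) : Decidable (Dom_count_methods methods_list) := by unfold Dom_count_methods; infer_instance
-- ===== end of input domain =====

-- B replaces A's flatten + five linear .count scans by sort-once + two binary searches per key
-- (alternative algorithm of similar cost; not claimed faster).

-- ===== PORT A =====
def count_methods (methods_list : List (List String)) : List (String × Int) :=
  let flat_list := methods_list.flatMap (fun sublist => sublist)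
  [("full_attention", (PySem.List.count flat_list "full_attention" : Int)),
   ("wars", (PySem.List.count flat_list "wars" : Int)),
   ("AST", (PySem.List.count flat_list "AST" : Int)),
   ("ASC", (PySem.List.count flat_list "ASC" : Int)),
   ("wars+ASC", (PySem.List.count flat_list "wars+ASC" : Int))]

-- ===== PORT B =====
-- hand-written bisect_left loop of Source B, with structural fuel = hi - lo (a pure totality
-- guard: the loop halves the interval, so hi - lo many steps always suffice);
-- a[mid] ported as getD (exact: 0 ≤ mid < hi ≤ len a at every call the port makes)
def pvBLGo (a : List String) (x : String) : Nat → Nat → Nat → Nat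
  | lo, _, 0 => lo
  | lo, hi, fuel + 1 =>
    if lo < hi then
      let mid := (lo + hi) / 2
      if a.getD mid "" < x then pvBLGo a x (mid + 1) hi fuel else pvBLGo a x lo mid fuel
    else lo

def pvBL (a : List String) (x : String) (lo hi : Nat) : Nat := pvBLGo a x lo hi (hi - lo)

-- hand-written bisect_right loop of Source B; same fuel and indexing remarks
def pvBRGo (a : List String) (x : String) : Nat → Nat → Nat → Nat
  | lo, _, 0 => lo
  | lo, hi, fuel + 1 =>
    if lo < hi then
      let mid := (lo + hi) / 2
      if x < a.getD mid "" then pvBRGo a x lo mid fuel else pvBRGo a x (mid + 1) hi fuel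
    else lo

def pvBR (a : List String) (x : String) (lo hi : Nat) : Nat := pvBRGo a x lo hi (hi - lo)

def count_methods_alt (methods_list : List (List String)) : List (String × Int) :=
  let flat := PySem.List.sorted (methods_list.flatMap (fun sublist => sublist)) (fun x => x) false
  ["full_attention", "wars", "AST", "ASC", "wars+ASC"].map (fun k =>
    (k, (pvBR flat k 0 flat.length : Int) - (pvBL flat k 0 flat.length : Int)))

-- ===== PRECONDITION & SPEC =====
def Spec_count_methods (methods_list : List (List String)) (out : List (String × Int)) : Prop := out = count_methods_alt methods_list
instance (methods_list : List (List String)) (out : List (String × Int)) : Decidable (Spec_count_methods methods_list out) := by unfold Spec_count_methods; infer_instance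

-- ===== CLAIM (what is proved, stated in full; the proofs are below) =====
def Claim_equal_count_methods : Prop := ∀ (methods_list : List (List String)), Dom_count_methods methods_list → Spec_count_methods methods_list (count_methods methods_list)

-- ===== LEMMAS AND PROOFS =====

-- if exactly the first n positions satisfy p, then countP p = n
theorem pvCountP_of_split (a : List String) (p : String → Bool) (n : Nat) (hn : n ≤ a.length)
    (h1 : ∀ i (h : i < a.length), i < n → p a[i] = true)
    (h2 : ∀ i (h : i < a.length), n ≤ i → p a[i] = false) :
    a.countP p = n := by
  conv_lhs => rw [← List.take_append_drop n a]
  rw [List.countP_append]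
  have ht : (a.take n).countP p = (a.take n).length := by
    rw [List.countP_eq_length]
    intro y hy
    obtain ⟨i, hi, rfl⟩ := List.mem_iff_getElem.mp hy
    rw [List.length_take] at hi
    have hil : i < a.length := by omega
    have : (a.take n)[i] = a[i] := List.getElem_take
    rw [this]
    exact h1 i hil (by omega)
  have hd : (a.drop n).countP p = 0 := by
    rw [List.countP_eq_zero]
    intro y hy
    obtain ⟨i, hi, rfl⟩ := List.mem_iff_getElem.mp hy
    rw [List.length_drop] at hi
    have hil : n + i < a.length := by omega
    have : (a.drop n)[i] = a[n + i] := List.getElem_drop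
    rw [this]
    simp [h2 (n + i) hil (by omega)]
  rw [ht, hd, a.length_take]
  omega

theorem pvBL_inv (a : List String) (x : String) (hs : a.Pairwise (· ≤ ·)) :
    ∀ (d lo hi : Nat), hi - lo ≤ d → lo ≤ hi → hi ≤ a.length →
    (∀ i (h : i < a.length), i < lo → a[i] < x) →
    (∀ i (h : i < a.length), hi ≤ i → ¬ a[i] < x) →
    pvBLGo a x lo hi d = a.countP (fun y => decide (y < x)) := by
  have hpw := List.pairwise_iff_getElem.mp hs
  intro d
  induction d with
  | zero =>
    intro lo hi hd hlh hlen H1 H2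
    have heq : lo = hi := by omega
    unfold pvBLGo
    exact (pvCountP_of_split a _ lo (by omega)
      (fun i h hi => by simpa using H1 i h hi)
      (fun i h hi => by simpa using H2 i h (by omega))).symm
  | succ d ih =>
    intro lo hi hd hlh hlen H1 H2
    by_cases h : lo < hi
    · have hmlt : (lo + hi) / 2 < hi := by omega
      have hmge : lo ≤ (lo + hi) / 2 := by omega
      have hmlen : (lo + hi) / 2 < a.length := by omega
      unfold pvBLGo
      rw [if_pos h]
      simp only [List.getD_eq_getElem a "" hmlen]
      by_cases hc : a[(lo + hi) / 2] < x
      · rw [if_pos hc]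
        refine ih ((lo + hi) / 2 + 1) hi (by omega) (by omega) hlen ?_ H2
        intro i hil hi2
        rcases Nat.lt_or_ge i ((lo + hi) / 2) with hlt | hge
        · exact lt_of_le_of_lt (hpw i ((lo + hi) / 2) hil hmlen hlt) hc
        · have : i = (lo + hi) / 2 := by omega
          subst this; exact hc
      · rw [if_neg hc]
        refine ih lo ((lo + hi) / 2) (by omega) (by omega) (by omega) H1 ?_
        intro i hil hi2 hcon
        rcases Nat.lt_or_ge ((lo + hi) / 2) i with hlt | hge
        · exact hc (lt_of_le_of_lt (hpw ((lo + hi) / 2) i hmlen hil hlt) hcon)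
        · have : i = (lo + hi) / 2 := by omega
          subst this; exact hc hcon
    · unfold pvBLGo
      rw [if_neg h]
      exact (pvCountP_of_split a _ lo (by omega)
        (fun i hl hi => by simpa using H1 i hl hi)
        (fun i hl hi => by simpa using H2 i hl (by omega))).symm

theorem pvBR_inv (a : List String) (x : String) (hs : a.Pairwise (· ≤ ·)) :
    ∀ (d lo hi : Nat), hi - lo ≤ d → lo ≤ hi → hi ≤ a.length →
    (∀ i (h : i < a.length), i < lo → a[i] ≤ x) →
    (∀ i (h : i < a.length), hi ≤ i → ¬ a[i] ≤ x) →
    pvBRGo a x lo hi d = a.countP (fun y => decide (y ≤ x)) := by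
  have hpw := List.pairwise_iff_getElem.mp hs
  intro d
  induction d with
  | zero =>
    intro lo hi hd hlh hlen H1 H2
    unfold pvBRGo
    exact (pvCountP_of_split a _ lo (by omega)
      (fun i h hi => by simpa using H1 i h hi)
      (fun i h hi => by simpa using H2 i h (by omega))).symm
  | succ d ih =>
    intro lo hi hd hlh hlen H1 H2
    by_cases h : lo < hi
    · have hmlt : (lo + hi) / 2 < hi := by omega
      have hmge : lo ≤ (lo + hi) / 2 := by omega
      have hmlen : (lo + hi) / 2 < a.length := by omega
      unfold pvBRGo
      rw [if_pos h]
      simp only [List.getD_eq_getElem a "" hmlen]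
      by_cases hc : x < a[(lo + hi) / 2]
      · rw [if_pos hc]
        refine ih lo ((lo + hi) / 2) (by omega) (by omega) (by omega) H1 ?_
        intro i hil hi2 hcon
        rcases Nat.lt_or_ge ((lo + hi) / 2) i with hlt | hge
        · exact absurd (le_trans (hpw ((lo + hi) / 2) i hmlen hil hlt) hcon) (not_le.mpr hc)
        · have : i = (lo + hi) / 2 := by omega
          subst this; exact absurd hcon (not_le.mpr hc)
      · rw [if_neg hc]
        refine ih ((lo + hi) / 2 + 1) hi (by omega) (by omega) hlen ?_ H2
        intro i hil hi2
        have hm : a[(lo + hi) / 2] ≤ x := not_lt.mp hc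
        rcases Nat.lt_or_ge i ((lo + hi) / 2) with hlt | hge
        · exact le_trans (hpw i ((lo + hi) / 2) hil hmlen hlt) hm
        · have : i = (lo + hi) / 2 := by omega
          subst this; exact hm
    · unfold pvBRGo
      rw [if_neg h]
      exact (pvCountP_of_split a _ lo (by omega)
        (fun i hl hi => by simpa using H1 i hl hi)
        (fun i hl hi => by simpa using H2 i hl (by omega))).symm

-- countP (≤ x) splits into countP (< x) plus the multiplicity of x
theorem pvCountP_le_split (x : String) : ∀ a : List String,
    a.countP (fun y => decide (y ≤ x)) = a.countP (fun y => decide (y < x)) + a.count x := by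
  intro a
  induction a with
  | nil => simp
  | cons y t ih =>
    rw [List.countP_cons, List.countP_cons, List.count_cons, ih]
    rcases lt_trichotomy y x with h | h | h
    · simp [h, le_of_lt h, (ne_of_lt h)]; omega
    · subst h; simp; omega
    · simp [not_lt_of_gt h, not_le_of_gt h, (ne_of_gt h)]

-- the value B computes for one key equals the multiplicity of that key in the unsorted data
theorem pvKey_eq (fl : List String) (k : String) :
    ((pvBR (PySem.List.sorted fl (fun x => x) false) k 0 (PySem.List.sorted fl (fun x => x) false).length : Int)
      - (pvBL (PySem.List.sorted fl (fun x => x) false) k 0 (PySem.List.sorted fl (fun x => x) false).length : Int))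
      = (fl.count k : Int) := by
  set s := PySem.List.sorted fl (fun x => x) false with hsdef
  have hs : s.Pairwise (· ≤ ·) := PySem.List.sorted_pairwise fl (fun x => x)
  have hbl : pvBL s k 0 s.length = s.countP (fun y => decide (y < k)) :=
    pvBL_inv s k hs (s.length - 0) 0 s.length (by omega) (by omega) le_rfl
      (fun i h hi => by omega) (fun i h hi => by omega)
  have hbr : pvBR s k 0 s.length = s.countP (fun y => decide (y ≤ k)) :=
    pvBR_inv s k hs (s.length - 0) 0 s.length (by omega) (by omega) le_rfl
      (fun i h hi => by omega) (fun i h hi => by omega)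
  have hperm : s.Perm fl := PySem.List.sorted_perm fl (fun x => x) false
  have hcnt : s.count k = fl.count k := hperm.count_eq k
  rw [hbl, hbr, pvCountP_le_split k s, hcnt]
  push_cast
  ring

-- ===== VERDICT (by name: the statement is the Claim_ definition above) =====
theorem count_methods_spec : Claim_equal_count_methods := by
  intro ml _
  unfold Spec_count_methods count_methods count_methods_alt
  simp only [List.map_cons, List.map_nil, PySem.List.count_eq]
  rw [pvKey_eq, pvKey_eq, pvKey_eq, pvKey_eq, pvKey_eq]
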